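-- pv_equiv track=rewrite | github.com/f1r3k3rn/codeforces | contests/1005/A.py | solve
-- ===== SOURCE A (Python) =====
-- def solve(n, bs):
--
--     start = 0
--     sol = 0
--     flip = "1"
--
--     for i in range(start,len(bs)):
--         if bs[i] == flip:
--             sol += 1
--             flip = "1" if flip == "0" else "0"
--
--
--     return sol
-- ===== SOURCE B (Python) =====
-- def solve(n, bs):
--     filtered = [c for c in bs if c == "1" or c == "0"]
--     keys = [c for p, c in zip([None] + filtered, filtered) if c != p]
--     for i, c in enumerate(keys):
--         if c == "1":
--             return len(keys) - i
--     return 0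
-- ===== Notes on version B (the rewrite author's own statement) =====
-- stated objective: alternative
-- what changed: Replaces A's stateful greedy flip-toggle scan with a run-length decomposition: filter the characters to '0'/'1', extract the maximal-run keys by comparing each element with its predecessor, and return the number of runs from the first '1' run onward.
import Mathlib
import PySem

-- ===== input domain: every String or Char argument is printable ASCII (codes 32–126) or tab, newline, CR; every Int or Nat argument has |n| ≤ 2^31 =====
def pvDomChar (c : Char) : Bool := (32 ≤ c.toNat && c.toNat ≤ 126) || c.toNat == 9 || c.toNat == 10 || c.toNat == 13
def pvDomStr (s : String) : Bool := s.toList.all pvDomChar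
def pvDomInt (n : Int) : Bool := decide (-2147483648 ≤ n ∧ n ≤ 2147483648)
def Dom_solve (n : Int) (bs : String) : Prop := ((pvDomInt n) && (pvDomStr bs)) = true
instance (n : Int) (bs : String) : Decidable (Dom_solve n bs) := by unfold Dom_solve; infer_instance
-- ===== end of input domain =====

-- B replaces A's stateful greedy flip-toggle scan by a run-length decomposition (filter to
-- '0'/'1', take run keys, count runs from the first '1' run); objective: alternative, same cost.

-- ===== PORT A =====
-- greedy scan: for i in range(0, len(bs)): if bs[i] == flip: sol += 1; flip toggles
def solve (n : Int) (bs : String) : Int :=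
  let start : Int := 0
  ((PySem.List.pyRange start (PySem.Str.len bs) 1).foldl
    (fun (st : Int × Char) i =>
      if PySem.List.pyGetD bs.toList i ' ' = st.2   -- bs[i]; i is always in range here
      then (st.1 + 1, if st.2 = '0' then '1' else '0') else st)
    (0, '1')).1

-- ===== PORT B =====
-- c == "1" or c == "0"
def binChar (c : Char) : Bool := c = '1' || c = '0'

-- the 'for i, c in enumerate(keys): if c == "1": return len(keys) - i / return 0' loop
def bScan (keysLen : Int) : List (Int × Char) → Int
  | [] => 0
  | (i, c) :: rest => if c = '1' then keysLen - i else bScan keysLen rest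

def solve_alt (n : Int) (bs : String) : Int :=
  let filtered := bs.toList.filter binChar
  let keys := (((none :: filtered.map some).zip filtered).filter
      (fun pc => !(some pc.2 == pc.1))).map (·.2)
  bScan (keys.length : Int) (PySem.List.enumerate keys 0)

-- ===== PRECONDITION & SPEC =====
def Spec_solve (n : Int) (bs : String) (out : Int) : Prop := out = solve_alt n bs
instance (n : Int) (bs : String) (out : Int) : Decidable (Spec_solve n bs out) := by unfold Spec_solve; infer_instance

-- ===== CLAIM (what is proved, stated in full; the proofs are below) =====
def Claim_equal_solve : Prop := ∀ (n : Int) (bs : String), Dom_solve n bs → Spec_solve n bs (solve n bs)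

-- ===== LEMMAS AND PROOFS =====

-- A's loop step on (sol, flip)
def stepA (st : Int × Char) (c : Char) : Int × Char :=
  if c = st.2 then (st.1 + 1, if st.2 = '0' then '1' else '0') else st

def tog (f : Char) : Char := if f = '0' then '1' else '0'

-- run keys of l given the previous character p (none = beginning)
def runKeys : Option Char → List Char → List Char
  | _, [] => []
  | p, c :: l => if some c ≠ p then c :: runKeys (some c) l else runKeys (some c) l

theorem stepA_pos (s : Int) (f c : Char) (h : c = f) : stepA (s, f) c = (s + 1, tog f) := by
  simp [stepA, h, tog]

theorem stepA_neg (s : Int) (f c : Char) (h : c ≠ f) : stepA (s, f) c = (s, f) := by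
  simp [stepA, h]

theorem tog_bin (f : Char) (hf : f = '0' ∨ f = '1') : tog f = '0' ∨ tog f = '1' := by
  rcases hf with h | h <;> simp [h, tog]

theorem tog_ne (f : Char) (hf : f = '0' ∨ f = '1') : tog f ≠ f := by
  rcases hf with h | h <;> simp [h, tog]

theorem ne_bin (f c : Char) (hf : f = '0' ∨ f = '1') (hc : c = '0' ∨ c = '1') (h : c ≠ f) :
    c = tog f := by
  rcases hf with h1 | h1 <;> rcases hc with h2 | h2 <;> simp_all [tog]

theorem runKeys_cons_ne (p : Option Char) (c : Char) (l : List Char) (h : some c ≠ p) :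
    runKeys p (c :: l) = c :: runKeys (some c) l := by
  simp [runKeys, h]

theorem runKeys_cons_eq (c : Char) (l : List Char) :
    runKeys (some c) (c :: l) = runKeys (some c) l := by
  simp [runKeys]

theorem foldl_stepA_shift (l : List Char) (s : Int) (f : Char) :
    (l.foldl stepA (s, f)).1 = s + (l.foldl stepA (0, f)).1 := by
  induction l generalizing s f with
  | nil => simp
  | cons c l ih =>
    by_cases h : c = f
    · rw [List.foldl_cons, List.foldl_cons, stepA_pos s f c h, stepA_pos 0 f c h,
        ih (s + 1), ih (0 + 1)]
      omega
    · rw [List.foldl_cons, List.foldl_cons, stepA_neg s f c h, stepA_neg 0 f c h]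
      exact ih s f

theorem foldl_stepA_filter (l : List Char) (s : Int) (f : Char) (hf : f = '0' ∨ f = '1') :
    l.foldl stepA (s, f) = (l.filter binChar).foldl stepA (s, f) := by
  induction l generalizing s f with
  | nil => rfl
  | cons c l ih =>
    by_cases hb : binChar c = true
    · rw [List.filter_cons, if_pos hb, List.foldl_cons, List.foldl_cons]
      by_cases h : c = f
      · rw [stepA_pos s f c h]
        exact ih (s + 1) (tog f) (tog_bin f hf)
      · rw [stepA_neg s f c h]
        exact ih s f hf
    · have hcf : c ≠ f := by
        intro h; subst h; rcases hf with h | h <;> simp [h, binChar] at hb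
      rw [List.filter_cons, if_neg hb, List.foldl_cons, stepA_neg s f c hcf]
      exact ih s f hf

-- the first run key after previous char c is (tog c) on a binary list
theorem runKeys_head (l : List Char) (c : Char)
    (hl : ∀ x ∈ l, x = '0' ∨ x = '1') (hc : c = '0' ∨ c = '1') :
    runKeys (some c) l = [] ∨ ∃ t, runKeys (some c) l = tog c :: t := by
  induction l generalizing c with
  | nil => left; rfl
  | cons d l ih =>
    have hd := hl d (by simp)
    by_cases h : d = c
    · subst h
      rw [runKeys_cons_eq]
      exact ih d (fun x hx => hl x (by simp [hx])) hc
    · right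
      refine ⟨runKeys (some d) l, ?_⟩
      have htd : tog c = d := (ne_bin c d hc hd h).symm
      rw [runKeys_cons_ne (some c) d l (by simp [h]), htd]

theorem main_loop (l : List Char) (f : Char) (p : Option Char)
    (hl : ∀ x ∈ l, x = '0' ∨ x = '1') (hf : f = '0' ∨ f = '1')
    (hp : p = none ∨ p = some (tog f)) :
    (l.foldl stepA (0, f)).1 = ((runKeys p l).dropWhile (fun c => !(c = f))).length := by
  induction l generalizing f p with
  | nil => simp [runKeys]
  | cons c l ih =>
    have hc := hl c (by simp)
    have hl' : ∀ x ∈ l, x = '0' ∨ x = '1' := fun x hx => hl x (by simp [hx])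
    have htog := tog_ne f hf
    by_cases h : c = f
    · subst h
      have hne : some c ≠ p := by
        rcases hp with hh | hh <;> simp [hh]
        exact fun hh2 => htog hh2.symm
      rw [List.foldl_cons, stepA_pos 0 c c rfl, foldl_stepA_shift,
        runKeys_cons_ne p c l hne, List.dropWhile_cons, if_neg (by simp)]
      have hihc : (l.foldl stepA (0, tog c)).1 =
          ((runKeys (some c) l).dropWhile (fun d => !(d = tog c))).length :=
        ih (tog c) (some c) hl' (tog_bin c hc)
          (Or.inr (by rcases hc with hh | hh <;> simp [hh, tog]))
      have hful : ((runKeys (some c) l).dropWhile (fun d => !(d = tog c))).length =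
          (runKeys (some c) l).length := by
        rcases runKeys_head l c hl' hc with hh | ⟨t, ht⟩
        · simp [hh]
        · simp [ht]
      rw [hihc, hful]
      simp only [List.length_cons]
      push_cast
      omega
    · have hcf : c = tog f := ne_bin f c hf hc h
      rcases hp with hpn | hps
      · subst hpn
        rw [List.foldl_cons, stepA_neg 0 f c h,
          runKeys_cons_ne none c l (by simp), List.dropWhile_cons, if_pos (by simp [h])]
        exact ih f (some c) hl' hf (Or.inr (by rw [hcf]))
      · subst hps
        have hrk : runKeys (some (tog f)) (c :: l) = runKeys (some c) l := by
          rw [hcf]; exact runKeys_cons_eq (tog f) l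
        rw [List.foldl_cons, stepA_neg 0 f c h, hrk]
        exact ih f (some c) hl' hf (Or.inr (by rw [hcf]))

-- the zip-with-predecessor comprehension computes runKeys
theorem zip_runKeys (l : List Char) (p : Option Char) :
    ((((p :: l.map some).zip l).filter (fun pc => !(some pc.2 == pc.1))).map (·.2))
      = runKeys p l := by
  induction l generalizing p with
  | nil => rfl
  | cons c l ih =>
    rw [List.map_cons, List.zip_cons_cons, List.filter_cons]
    by_cases h : some c = p
    · rw [if_neg (by simp [h]), ih (some c)]
      subst h
      rw [runKeys_cons_eq]
    · rw [if_pos (by simp [h]), List.map_cons, runKeys_cons_ne p c l h, ih (some c)]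

-- B's enumerate loop counts the suffix from the first '1'
theorem bScan_spec (l : List Char) (s L : Int) (h : L = s + l.length) :
    bScan L (PySem.List.enumerate l s) = (l.dropWhile (fun c => !(c = '1'))).length := by
  induction l generalizing s with
  | nil => simp [PySem.List.enumerate, bScan]
  | cons c l ih =>
    rw [PySem.List.enumerate_cons]
    simp only [bScan]
    by_cases hc : c = '1'
    · rw [if_pos hc, List.dropWhile_cons, if_neg (by simp [hc])]
      simp only [List.length_cons] at h ⊢
      push_cast at h ⊢
      omega
    · rw [if_neg hc, List.dropWhile_cons, if_pos (by simp [hc]),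
        ih (s + 1) (by simp only [List.length_cons] at h; push_cast at h ⊢; omega)]

-- ===== VERDICT (by name: the statement is the Claim_ definition above) =====
theorem solve_spec : Claim_equal_solve := by
  intro n bs _
  unfold Spec_solve solve solve_alt
  simp only
  rw [show PySem.Str.len bs = (bs.toList.length : Int) from by simp [pysem]]
  rw [show (fun (st : Int × Char) (i : Int) =>
      if PySem.List.pyGetD bs.toList i ' ' = st.2
      then (st.1 + 1, if st.2 = '0' then '1' else '0') else st)
    = (fun (st : Int × Char) (i : Int) => stepA st (PySem.List.pyGetD bs.toList i ' ')) from rfl]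
  rw [PySem.List.foldl_pyRange_zero_pyGetD' bs.toList ' ' stepA (0, '1')]
  rw [foldl_stepA_filter bs.toList 0 '1' (Or.inr rfl)]
  rw [main_loop (bs.toList.filter binChar) '1' none
    (by intro x hx; rw [List.mem_filter] at hx; have h2 := hx.2; simp [binChar] at h2; tauto)
    (Or.inr rfl) (Or.inl rfl)]
  rw [zip_runKeys (bs.toList.filter binChar) none]
  rw [bScan_spec (runKeys none (bs.toList.filter binChar)) 0 _ (by simp)]
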